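-- pv_equiv track=rewrite | github.com/altovacio/duelo-de-plumas | scripts/analyze_endpoint_usage.py | paths_match
-- ===== SOURCE A (Python) =====
-- def paths_match(logged_path: str, template_path: str) -> bool:
--     """
--     Checks if a logged path matches a template path based on the rule:
--     '{var}' in template matches any integer segment in logged path.
--     Other segments must match exactly.
--     """
--     logged_segments = logged_path.strip('/').split('/')
--     template_segments = template_path.strip('/').split('/')
--
--     if len(logged_segments) != len(template_segments):
--         return False
--
--     for log_seg, tpl_seg in zip(logged_segments, template_segments):
--         if tpl_seg.startswith('{') and tpl_seg.endswith('}'):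
--             # Template segment is a variable, check if logged segment is an integer
--             if not log_seg.isdigit():
--                 return False
--         elif log_seg != tpl_seg:
--             # Segments are not variables and do not match literally
--             return False
--
--     # If all segments matched according to the rules
--     return True
-- ===== SOURCE B (Python) =====
-- def paths_match(logged_path: str, template_path: str) -> bool:
--     """Same matching rule as A, written as structural recursion over the two
--     segment lists at once: no zip, no separate length check (a length mismatch
--     falls out of the recursion reaching the end of only one list)."""
--
--     def seg_ok(log_seg, tpl_seg):
--         if tpl_seg.startswith('{') and tpl_seg.endswith('}'):
--             return log_seg.isdigit()
--         return log_seg == tpl_seg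
--
--     def match(ls, ts):
--         if not ls or not ts:
--             return not ls and not ts
--         return seg_ok(ls[0], ts[0]) and match(ls[1:], ts[1:])
--
--     return match(logged_path.strip('/').split('/'),
--                  template_path.strip('/').split('/'))
-- ===== Notes on version B (the rewrite author's own statement) =====
-- stated objective: simpler
-- what changed: Replaces the zip-loop with early returns plus a separate length check by a single structural recursion over the two segment lists at once (a per-segment predicate and-folded down both lists; length mismatch falls out of the recursion).
import Mathlib
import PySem

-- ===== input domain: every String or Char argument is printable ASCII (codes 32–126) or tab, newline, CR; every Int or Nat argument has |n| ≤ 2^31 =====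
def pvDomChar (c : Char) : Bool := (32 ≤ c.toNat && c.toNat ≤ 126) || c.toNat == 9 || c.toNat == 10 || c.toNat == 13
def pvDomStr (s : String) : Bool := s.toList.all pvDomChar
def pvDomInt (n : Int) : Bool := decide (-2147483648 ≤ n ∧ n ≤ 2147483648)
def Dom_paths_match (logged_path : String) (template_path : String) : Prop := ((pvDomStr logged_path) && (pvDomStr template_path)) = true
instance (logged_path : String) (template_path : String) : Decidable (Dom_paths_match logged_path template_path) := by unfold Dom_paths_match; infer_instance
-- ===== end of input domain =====

-- B replaces A's zip-loop with separate length check by one structural recursion over both segment lists (simpler decomposition, same O(n) cost).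

-- ===== PORT A =====
-- A: strip '/' from both ends, split on '/', compare lengths, then a loop over
-- the zipped segment pairs with early returns.
-- split('/') with the nonempty literal separator never raises; the '.getD []' arm is unreachable.
def pmSplit (s : String) : List String :=
  (PySem.Str.split? (PySem.Str.stripChars s "/") "/").getD []

def pmLoop : List (String × String) → Bool
  | [] => true
  | (log_seg, tpl_seg) :: rest =>
    if PySem.Str.startswith tpl_seg "{" && PySem.Str.endswith tpl_seg "}" then
      if !PySem.Str.strIsdigit log_seg then false
      else pmLoop rest
    else if log_seg ≠ tpl_seg then false
    else pmLoop rest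

def paths_match (logged_path : String) (template_path : String) : Bool :=
  let logged_segments := pmSplit logged_path
  let template_segments := pmSplit template_path
  if logged_segments.length ≠ template_segments.length then false
  else pmLoop (logged_segments.zip template_segments)

-- ===== PORT B =====
-- B: one per-segment predicate and a structural recursion over both segment
-- lists at once; no zip and no separate length check.
def pmSegOk (log_seg tpl_seg : String) : Bool :=
  if PySem.Str.startswith tpl_seg "{" && PySem.Str.endswith tpl_seg "}" then
    PySem.Str.strIsdigit log_seg
  else log_seg == tpl_seg

def pmMatch : List String → List String → Bool
  | [], [] => true
  | [], _ :: _ => false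
  | _ :: _, [] => false
  | l :: ls, t :: ts => pmSegOk l t && pmMatch ls ts

def paths_match_alt (logged_path : String) (template_path : String) : Bool :=
  pmMatch (pmSplit logged_path) (pmSplit template_path)

-- ===== PRECONDITION & SPEC =====
def Spec_paths_match (logged_path : String) (template_path : String) (out : Bool) : Prop := out = paths_match_alt logged_path template_path
instance (logged_path : String) (template_path : String) (out : Bool) : Decidable (Spec_paths_match logged_path template_path out) := by unfold Spec_paths_match; infer_instance

-- ===== CLAIM (what is proved, stated in full; the proofs are below) =====
def Claim_equal_paths_match : Prop := ∀ (logged_path : String) (template_path : String), Dom_paths_match logged_path template_path → Spec_paths_match logged_path template_path (paths_match logged_path template_path)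

-- ===== LEMMAS AND PROOFS =====
theorem pmLoop_cons (l t : String) (rest : List (String × String)) :
    pmLoop ((l, t) :: rest) = (pmSegOk l t && pmLoop rest) := by
  simp only [pmLoop, pmSegOk]
  split_ifs with h1 h2 h3 <;> simp_all

theorem pmMatch_eq_loop (ls ts : List String) :
    pmMatch ls ts = if ls.length ≠ ts.length then false else pmLoop (ls.zip ts) := by
  induction ls generalizing ts with
  | nil => cases ts <;> simp [pmMatch, pmLoop]
  | cons l ls ih =>
    cases ts with
    | nil => simp [pmMatch]
    | cons t ts =>
      simp only [pmMatch, List.zip_cons_cons, pmLoop_cons, ih, List.length_cons]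
      by_cases h : ls.length = ts.length <;> simp [h]

-- ===== VERDICT (by name: the statement is the Claim_ definition above) =====
theorem paths_match_spec : Claim_equal_paths_match := by
  intro lp tp _
  unfold Spec_paths_match paths_match paths_match_alt
  simp [pmMatch_eq_loop]
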